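-- pv_equiv track=rewrite | github.com/dkosko/Knapsack-in-uncertainty | knapsack01.py | na_vector
-- ===== SOURCE A (Python) =====
-- def na_vector(vec, num):
--     """Funkcja konwertuje listę indeksów produktów na listę 01 z całą listą produktów,
--     gdzie 1 oznacza, że bierzemy produkt do plecaka, a 0 że nie
--     vec - listę indeksów produktów, które są brane do plecaka
--     num - pełna lista indeksów produktów
--
--     Funkcja zwraca:
--     vec_x - lista 01 wskazująca na produkty, które są brane do plecaka"""
--
--
--     vec_x = []
--     for i in range(num):
--         if i in vec:
--             vec_x.append(1)
--         else:
--             vec_x.append(0)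
--     return vec_x
-- ===== SOURCE B (Python) =====
-- def na_vector(vec, num):
--     vec_x = [0] * num
--     for idx in vec:
--         if 0 <= idx < num:
--             vec_x[idx] = 1
--     return vec_x
-- ===== Notes on version B (the rewrite author's own statement) =====
-- stated objective: faster
-- what changed: Instead of looping over range(num) and doing a linear membership test of each position in vec, B allocates a zero vector once and scatters a 1 at each in-range index of vec.
import Mathlib
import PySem

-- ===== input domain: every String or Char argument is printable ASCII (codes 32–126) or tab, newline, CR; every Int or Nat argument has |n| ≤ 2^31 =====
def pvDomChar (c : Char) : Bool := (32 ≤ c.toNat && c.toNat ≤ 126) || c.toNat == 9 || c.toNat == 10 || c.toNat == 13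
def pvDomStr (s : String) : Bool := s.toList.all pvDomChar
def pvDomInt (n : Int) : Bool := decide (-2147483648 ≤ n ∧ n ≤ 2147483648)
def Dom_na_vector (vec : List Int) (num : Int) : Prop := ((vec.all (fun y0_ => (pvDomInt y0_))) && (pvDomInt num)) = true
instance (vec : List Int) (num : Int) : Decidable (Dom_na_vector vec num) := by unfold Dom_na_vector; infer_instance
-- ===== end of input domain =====

-- B replaces the range(num) loop with a membership test per position by one
-- zero-vector allocation plus scatter writes at the in-range indices of vec (faster for long vec).

-- ===== PORT A =====
def na_vector (vec : List Int) (num : Int) : List Int :=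
  (PySem.List.pyRange 0 num 1).foldl
    (fun vec_x i => if i ∈ vec then vec_x ++ [1] else vec_x ++ [0]) []

-- ===== PORT B =====
def na_vector_alt (vec : List Int) (num : Int) : List Int :=
  vec.foldl
    (fun vec_x idx => if 0 ≤ idx ∧ idx < num then vec_x.set idx.toNat 1 else vec_x)
    (List.replicate num.toNat 0)

-- ===== PRECONDITION & SPEC =====
def Spec_na_vector (vec : List Int) (num : Int) (out : List Int) : Prop := out = na_vector_alt vec num
instance (vec : List Int) (num : Int) (out : List Int) : Decidable (Spec_na_vector vec num out) := by unfold Spec_na_vector; infer_instance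

-- ===== CLAIM (what is proved, stated in full; the proofs are below) =====
def Claim_equal_na_vector : Prop := ∀ (vec : List Int) (num : Int), Dom_na_vector vec num → Spec_na_vector vec num (na_vector vec num)

-- ===== LEMMAS AND PROOFS =====

theorem na_vector_eq_map (vec : List Int) (num : Int) :
    na_vector vec num = (PySem.List.pyRange 0 num 1).map (fun i => if i ∈ vec then 1 else 0) := by
  unfold na_vector
  have h : ∀ (l : List Int) (acc : List Int),
      l.foldl (fun vec_x i => if i ∈ vec then vec_x ++ [1] else vec_x ++ [0]) acc
        = acc ++ l.map (fun i => if i ∈ vec then 1 else 0) := by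
    intro l
    induction l with
    | nil => simp
    | cons x xs ih =>
      intro acc
      simp only [List.foldl_cons, List.map_cons, ih]
      split_ifs <;> simp
  simpa using h (PySem.List.pyRange 0 num 1) []

theorem scatter_length (vec : List Int) (num : Int) (a : List Int) :
    (vec.foldl (fun vec_x idx => if 0 ≤ idx ∧ idx < num then vec_x.set idx.toNat 1 else vec_x) a).length
      = a.length := by
  induction vec generalizing a with
  | nil => rfl
  | cons x xs ih =>
    simp only [List.foldl_cons]
    rw [ih]
    split_ifs <;> simp

theorem scatter_get (vec : List Int) (num : Int) (a : List Int) (j : Nat)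
    (hj : j < a.length)
    (hj' : j < (vec.foldl (fun vec_x idx => if 0 ≤ idx ∧ idx < num then vec_x.set idx.toNat 1 else vec_x) a).length) :
    (vec.foldl (fun vec_x idx => if 0 ≤ idx ∧ idx < num then vec_x.set idx.toNat 1 else vec_x) a)[j]'hj'
      = if (j : Int) ∈ vec ∧ (j : Int) < num then 1 else a[j]'hj := by
  induction vec generalizing a with
  | nil => simp
  | cons x xs ih =>
    simp only [List.foldl_cons] at hj' ⊢
    have hlen : (if 0 ≤ x ∧ x < num then a.set x.toNat 1 else a).length = a.length := by
      split_ifs <;> simp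
    rw [ih _ (hlen ▸ hj) hj']
    by_cases hmem : (j : Int) ∈ xs ∧ (j : Int) < num
    · rw [if_pos hmem, if_pos ⟨List.mem_cons_of_mem x hmem.1, hmem.2⟩]
    · rw [if_neg hmem]
      by_cases hx : 0 ≤ x ∧ x < num
      · simp only [if_pos hx]
        by_cases hxj : x.toNat = j
        · have hxj' : x = (j : Int) := by omega
          have : ((j : Int) ∈ x :: xs ∧ (j : Int) < num) := ⟨by simp [hxj'], by omega⟩
          rw [if_pos this]
          subst hxj
          simp
        · rw [List.getElem_set_ne hxj]
          by_cases hc : (j : Int) ∈ x :: xs ∧ (j : Int) < num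
          · exfalso
            rcases hc with ⟨hc1, hc2⟩
            rcases List.mem_cons.mp hc1 with h | h
            · exact hxj (by omega)
            · exact hmem ⟨h, hc2⟩
          · rw [if_neg hc]
      · simp only [if_neg hx]
        by_cases hc : (j : Int) ∈ x :: xs ∧ (j : Int) < num
        · exfalso
          rcases hc with ⟨hc1, hc2⟩
          rcases List.mem_cons.mp hc1 with h | h
          · exact hx ⟨by omega, by omega⟩
          · exact hmem ⟨h, hc2⟩
        · rw [if_neg hc]

-- ===== VERDICT (by name: the statement is the Claim_ definition above) =====
theorem na_vector_spec : Claim_equal_na_vector := by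
  intro vec num _
  show na_vector vec num = na_vector_alt vec num
  rw [na_vector_eq_map]
  unfold na_vector_alt
  have hlenA : ((PySem.List.pyRange 0 num 1).map (fun i => if i ∈ vec then (1:Int) else 0)).length = num.toNat := by
    simp [PySem.List.length_pyRange_one]
  have hlenB :
      (vec.foldl (fun vec_x idx => if 0 ≤ idx ∧ idx < num then vec_x.set idx.toNat 1 else vec_x)
        (List.replicate num.toNat (0:Int))).length = num.toNat := by
    rw [scatter_length]; simp
  apply List.ext_getElem (hlenA.trans hlenB.symm)
  intro j h1 h2
  have hjn : j < num.toNat := lt_of_lt_of_eq h1 hlenA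
  have hrep : j < (List.replicate num.toNat (0:Int)).length := by simpa using hjn
  rw [scatter_get vec num _ j hrep h2]
  have hA : ((PySem.List.pyRange 0 num 1).map (fun i => if i ∈ vec then (1:Int) else 0))[j]'h1
      = if ((0:Int) + (j:Int)) ∈ vec then 1 else 0 := by
    simp [PySem.List.getElem_pyRange_one]
  rw [hA]
  have hjlt : (j : Int) < num := by omega
  simp only [zero_add, List.getElem_replicate]
  by_cases hm : (j : Int) ∈ vec
  · rw [if_pos hm, if_pos ⟨hm, hjlt⟩]
  · rw [if_neg hm, if_neg (fun h => hm h.1)]
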